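-- pv_equiv track=rewrite | github.com/Kartik-ins/CS367AI | LAB2/plagiarism-check.py | sentence_alignment_cost
-- ===== SOURCE A (Python) =====
-- def edit_distance(word1, word2):
--     m, n = len(word1), len(word2)
--     dp = [[0] * (n + 1) for _ in range(m + 1)]
--
--     for i in range(m + 1):
--         for j in range(n + 1):
--             if i == 0:
--                 dp[i][j] = j
--             elif j == 0:
--                 dp[i][j] = i
--             elif word1[i - 1] == word2[j - 1]:
--                 dp[i][j] = dp[i - 1][j - 1]
--             else:
--                 dp[i][j] = 1 + min(dp[i - 1][j], dp[i][j - 1], dp[i - 1][j - 1])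
--     return dp[m][n]
--
-- def sentence_alignment_cost(sent1_words, sent2_words):
--     m, n = len(sent1_words), len(sent2_words)
--     dp = [[0] * (n + 1) for _ in range(m + 1)]
--
--     for i in range(m + 1):
--         for j in range(n + 1):
--             if i == 0 and j == 0:
--                 dp[i][j] = 0
--             elif i == 0:
--                 dp[i][j] = dp[i][j - 1] + len(sent2_words[j - 1])
--             elif j == 0:
--                 dp[i][j] = dp[i - 1][j] + len(sent1_words[i - 1])
--             else:
--                 cost_substitute = dp[i - 1][j - 1] + edit_distance(sent1_words[i - 1], sent2_words[j - 1])
--                 cost_delete_s1 = dp[i - 1][j] + len(sent1_words[i - 1])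
--                 cost_delete_s2 = dp[i][j - 1] + len(sent2_words[j - 1])
--                 dp[i][j] = min(cost_substitute, cost_delete_s1, cost_delete_s2)
--     return dp[m][n]
-- ===== SOURCE B (Python) =====
-- def _edit_distance(word1, word2):
--     # top-down memoized recursion on prefix lengths
--     memo = {}
--
--     def f(i, j):
--         if i == 0:
--             return j
--         if j == 0:
--             return i
--         if (i, j) not in memo:
--             if word1[i - 1] == word2[j - 1]:
--                 memo[(i, j)] = f(i - 1, j - 1)
--             else:
--                 memo[(i, j)] = 1 + min(f(i - 1, j), f(i, j - 1), f(i - 1, j - 1))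
--         return memo[(i, j)]
--
--     return f(len(word1), len(word2))
--
--
-- def sentence_alignment_cost(sent1_words, sent2_words):
--     # top-down memoized recursion instead of a bottom-up table
--     memo = {}
--
--     def f(i, j):
--         if i == 0 and j == 0:
--             return 0
--         if i == 0:
--             return f(0, j - 1) + len(sent2_words[j - 1])
--         if j == 0:
--             return f(i - 1, 0) + len(sent1_words[i - 1])
--         if (i, j) not in memo:
--             memo[(i, j)] = min(
--                 f(i - 1, j - 1) + _edit_distance(sent1_words[i - 1], sent2_words[j - 1]),
--                 f(i - 1, j) + len(sent1_words[i - 1]),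
--                 f(i, j - 1) + len(sent2_words[j - 1]))
--         return memo[(i, j)]
--
--     return f(len(sent1_words), len(sent2_words))
-- ===== Notes on version B (the rewrite author's own statement) =====
-- stated objective: alternative
-- what changed: A's bottom-up (m+1)x(n+1) DP tables at both the sentence level and the inner character level are replaced by top-down memoized recursion on prefix lengths (an explicit memo dict per call), inverting the control flow from iterative table fill to recursive descent.
import Mathlib
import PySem

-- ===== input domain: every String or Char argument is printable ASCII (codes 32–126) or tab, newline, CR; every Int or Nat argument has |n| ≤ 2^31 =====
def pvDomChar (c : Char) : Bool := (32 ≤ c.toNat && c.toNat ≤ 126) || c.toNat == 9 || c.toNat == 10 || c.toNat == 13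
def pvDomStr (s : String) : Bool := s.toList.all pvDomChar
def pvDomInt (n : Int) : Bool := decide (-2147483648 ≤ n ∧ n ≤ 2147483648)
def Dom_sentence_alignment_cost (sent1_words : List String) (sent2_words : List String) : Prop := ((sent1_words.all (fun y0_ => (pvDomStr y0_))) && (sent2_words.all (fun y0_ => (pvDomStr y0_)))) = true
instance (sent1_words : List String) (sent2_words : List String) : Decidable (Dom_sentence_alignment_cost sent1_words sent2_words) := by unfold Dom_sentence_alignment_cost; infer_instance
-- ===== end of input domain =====

-- B replaces A's bottom-up DP tables (at both the sentence and the character level) by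
-- top-down memoized recursion on prefix lengths: same recurrence, inverted control flow.


-- ===== PORT A =====
-- Python's 2-D list dp: every read and write uses an in-range non-negative index,
-- so List.getD / List.set are exact here.
def pvGet2 (dp : List (List Int)) (i j : Nat) : Int := (dp.getD i []).getD j 0

def pvSet2 (dp : List (List Int)) (i j : Nat) (v : Int) : List (List Int) :=
  dp.set i ((dp.getD i []).set j v)

-- the loop skeleton A's two functions share verbatim:
-- dp = [[0]*(n+1) for _ in range(m+1)]; for i in range(m+1): for j in range(n+1): dp[i][j] = <cell>
def pvFill (m n : Nat) (cell : List (List Int) → Nat → Nat → Int) : List (List Int) :=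
  (List.range (m+1)).foldl
    (fun dp i => (List.range (n+1)).foldl (fun dp j => pvSet2 dp i j (cell dp i j)) dp)
    (List.replicate (m+1) (List.replicate (n+1) 0))

-- A's helper edit_distance; its str arguments are handled as char lists (exact)
def edit_distance (word1 word2 : List Char) : Int :=
  let m := word1.length
  let n := word2.length
  let dp := pvFill m n (fun dp i j =>
    if i = 0 then (j : Int)
    else if j = 0 then (i : Int)
    else if word1.getD (i-1) default = word2.getD (j-1) default then pvGet2 dp (i-1) (j-1)
    else 1 + min (pvGet2 dp (i-1) j) (min (pvGet2 dp i (j-1)) (pvGet2 dp (i-1) (j-1))))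
  pvGet2 dp m n

def sentence_alignment_cost (sent1_words : List String) (sent2_words : List String) : Int :=
  let m := sent1_words.length
  let n := sent2_words.length
  let dp := pvFill m n (fun dp i j =>
    if i = 0 ∧ j = 0 then 0
    else if i = 0 then pvGet2 dp i (j-1) + PySem.Str.len (sent2_words.getD (j-1) "")
    else if j = 0 then pvGet2 dp (i-1) j + PySem.Str.len (sent1_words.getD (i-1) "")
    else
      min (pvGet2 dp (i-1) (j-1) +
            edit_distance (sent1_words.getD (i-1) "").toList (sent2_words.getD (j-1) "").toList)
        (min (pvGet2 dp (i-1) j + PySem.Str.len (sent1_words.getD (i-1) ""))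
             (pvGet2 dp i (j-1) + PySem.Str.len (sent2_words.getD (j-1) ""))))
  pvGet2 dp m n

-- ===== PORT B =====
-- Source B's _edit_distance: top-down recursion f(i, j) with an explicit memo dict
-- (keys (i, j) with i, j ≥ 1, exactly the keys Python stores), memo threaded through
def edGoB (w1 w2 : List Char) (i j : Nat) (mm : PySem.Dict (Nat × Nat) Int) :
    Int × PySem.Dict (Nat × Nat) Int :=
  match i, j with
  | 0, j => ((j : Int), mm)
  | (i+1), 0 => (((i+1 : Nat) : Int), mm)
  | (i+1), (j+1) =>
    match mm.get? (i+1, j+1) with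
    | some v => (v, mm)
    | none =>
      let r :=
        if w1.getD i default = w2.getD j default then
          edGoB w1 w2 i j mm
        else
          let a := edGoB w1 w2 i (j+1) mm
          let b := edGoB w1 w2 (i+1) j a.2
          let c := edGoB w1 w2 i j b.2
          (1 + min a.1 (min b.1 c.1), c.2)
      (r.1, r.2.insert (i+1, j+1) r.1)
termination_by i + j
decreasing_by all_goals omega

def pyEditDistB (word1 word2 : String) : Int :=
  (edGoB word1.toList word2.toList word1.toList.length word2.toList.length PySem.Dict.empty).1

-- Source B's outer f(i, j): base-case chains recurse without the memo, the general case is memoized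
def sacGoB (L1 L2 : List String) (i j : Nat) (mm : PySem.Dict (Nat × Nat) Int) :
    Int × PySem.Dict (Nat × Nat) Int :=
  match i, j with
  | 0, 0 => (0, mm)
  | 0, (j+1) =>
    let r := sacGoB L1 L2 0 j mm
    (r.1 + PySem.Str.len (L2.getD j ""), r.2)
  | (i+1), 0 =>
    let r := sacGoB L1 L2 i 0 mm
    (r.1 + PySem.Str.len (L1.getD i ""), r.2)
  | (i+1), (j+1) =>
    match mm.get? (i+1, j+1) with
    | some v => (v, mm)
    | none =>
      let a := sacGoB L1 L2 i j mm
      let s := a.1 + pyEditDistB (L1.getD i "") (L2.getD j "")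
      let b := sacGoB L1 L2 i (j+1) a.2
      let c := sacGoB L1 L2 (i+1) j b.2
      let v := min s (min (b.1 + PySem.Str.len (L1.getD i ""))
                          (c.1 + PySem.Str.len (L2.getD j "")))
      (v, c.2.insert (i+1, j+1) v)
termination_by i + j
decreasing_by all_goals omega

def sentence_alignment_cost_alt (sent1_words : List String) (sent2_words : List String) : Int :=
  (sacGoB sent1_words sent2_words sent1_words.length sent2_words.length PySem.Dict.empty).1

-- ===== PRECONDITION & SPEC =====
def Spec_sentence_alignment_cost (sent1_words : List String) (sent2_words : List String) (out : Int) : Prop := out = sentence_alignment_cost_alt sent1_words sent2_words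
instance (sent1_words : List String) (sent2_words : List String) (out : Int) : Decidable (Spec_sentence_alignment_cost sent1_words sent2_words out) := by unfold Spec_sentence_alignment_cost; infer_instance

-- ===== CLAIM (what is proved, stated in full; the proofs are below) =====
def Claim_equal_sentence_alignment_cost : Prop := ∀ (sent1_words : List String) (sent2_words : List String), Dom_sentence_alignment_cost sent1_words sent2_words → Spec_sentence_alignment_cost sent1_words sent2_words (sentence_alignment_cost sent1_words sent2_words)

-- ===== LEMMAS AND PROOFS =====

-- the common value of both programs, as a recurrence: character level …
def WE (w1 w2 : List Char) : Nat → Nat → Int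
  | 0, j => (j : Int)
  | (i+1), 0 => ((i+1 : Nat) : Int)
  | (i+1), (j+1) =>
      if w1.getD i default = w2.getD j default then WE w1 w2 i j
      else 1 + min (WE w1 w2 i (j+1)) (min (WE w1 w2 (i+1) j) (WE w1 w2 i j))

-- … and word level
def WS (L1 L2 : List String) : Nat → Nat → Int
  | 0, 0 => 0
  | 0, (j+1) => WS L1 L2 0 j + PySem.Str.len (L2.getD j "")
  | (i+1), 0 => WS L1 L2 i 0 + PySem.Str.len (L1.getD i "")
  | (i+1), (j+1) =>
      min (WS L1 L2 i j + edit_distance (L1.getD i "").toList (L2.getD j "").toList)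
        (min (WS L1 L2 i (j+1) + PySem.Str.len (L1.getD i ""))
             (WS L1 L2 (i+1) j + PySem.Str.len (L2.getD j "")))

-- ---- A side: the table fill computes the recurrence ----
def pvDims (m n : Nat) (dp : List (List Int)) : Prop :=
  dp.length = m+1 ∧ ∀ r ∈ dp, r.length = n+1

def pvFilled (W : Nat → Nat → Int) (m n : Nat) (dp : List (List Int)) (i j : Nat) : Prop :=
  pvDims m n dp ∧
  ∀ i' j', i' ≤ m → j' ≤ n → (i' < i ∨ (i' = i ∧ j' < j)) → pvGet2 dp i' j' = W i' j'

theorem pvGetD_set_ne {α : Type} (l : List α) (i i' : Nat) (h : i' ≠ i) (a d : α) :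
    (l.set i a).getD i' d = l.getD i' d := by
  rw [List.getD_eq_getElem?_getD, List.getElem?_set, if_neg (Ne.symm h),
    ← List.getD_eq_getElem?_getD]

theorem pvGetD_set_self {α : Type} (l : List α) (i : Nat) (hi : i < l.length) (a d : α) :
    (l.set i a).getD i d = a := by
  rw [List.getD_eq_getElem?_getD, List.getElem?_set, if_pos rfl, if_pos hi, Option.getD_some]

theorem pvGet2_set2 {m n : Nat} {dp : List (List Int)} (hd : pvDims m n dp)
    {i j : Nat} (hi : i ≤ m) (hj : j ≤ n) (v : Int) (i' j' : Nat) :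
    pvGet2 (pvSet2 dp i j v) i' j' =
      if i' = i ∧ j' = j then v else pvGet2 dp i' j' := by
  obtain ⟨hlen, hrows⟩ := hd
  have hilt : i < dp.length := by omega
  have hrow : (dp.getD i []).length = n+1 := by
    rw [List.getD_eq_getElem _ _ hilt]; exact hrows _ (List.getElem_mem hilt)
  unfold pvGet2 pvSet2
  by_cases h1 : i' = i
  · subst h1
    rw [pvGetD_set_self _ _ hilt]
    by_cases h2 : j' = j
    · subst h2
      rw [pvGetD_set_self _ _ (by omega), if_pos ⟨rfl, rfl⟩]
    · rw [pvGetD_set_ne _ _ _ h2, if_neg (by tauto)]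
  · rw [pvGetD_set_ne _ _ _ h1, if_neg (by tauto)]

theorem pvDims_set2 {m n : Nat} {dp : List (List Int)} (hd : pvDims m n dp)
    {i : Nat} (hi : i ≤ m) (j : Nat) (v : Int) : pvDims m n (pvSet2 dp i j v) := by
  obtain ⟨hlen, hrows⟩ := hd
  have hilt : i < dp.length := by omega
  refine ⟨by simp [pvSet2, hlen], ?_⟩
  intro r hr
  rcases List.mem_or_eq_of_mem_set hr with h | h
  · exact hrows _ h
  · subst h
    rw [List.length_set, List.getD_eq_getElem _ _ hilt]
    exact hrows _ (List.getElem_mem hilt)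

theorem pvFill_inner {W : Nat → Nat → Int} {m n : Nat}
    {cell : List (List Int) → Nat → Nat → Int}
    (Hcell : ∀ dp i j, i ≤ m → j ≤ n → pvFilled W m n dp i j → cell dp i j = W i j)
    {i : Nat} (hi : i ≤ m) :
    ∀ (k j0 : Nat) (dp : List (List Int)), j0 + k = n+1 → pvFilled W m n dp i j0 →
      pvFilled W m n
        ((List.range' j0 k).foldl (fun dp j => pvSet2 dp i j (cell dp i j)) dp) i (j0+k) := by
  intro k
  induction k with
  | zero => intro j0 dp _ h; simpa using h
  | succ k ih =>
    intro j0 dp hk h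
    have hj0 : j0 ≤ n := by omega
    rw [List.range'_succ, List.foldl_cons]
    have h' : pvFilled W m n (pvSet2 dp i j0 (cell dp i j0)) i (j0+1) := by
      refine ⟨pvDims_set2 h.1 hi j0 _, ?_⟩
      intro i' j' hi' hj' hord
      rw [pvGet2_set2 h.1 hi hj0]
      by_cases he : i' = i ∧ j' = j0
      · rw [if_pos he, Hcell dp i j0 hi hj0 h, he.1, he.2]
      · rw [if_neg he]
        exact h.2 i' j' hi' hj' (by omega)
    have := ih (j0+1) _ (by omega) h'
    have heq : j0 + 1 + k = j0 + (k+1) := by omega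
    rwa [heq] at this

theorem pvFill_spec {W : Nat → Nat → Int} {m n : Nat}
    {cell : List (List Int) → Nat → Nat → Int}
    (Hcell : ∀ dp i j, i ≤ m → j ≤ n → pvFilled W m n dp i j → cell dp i j = W i j)
    {i j : Nat} (hi : i ≤ m) (hj : j ≤ n) :
    pvGet2 (pvFill m n cell) i j = W i j := by
  have outer : ∀ (k i0 : Nat) (dp : List (List Int)), i0 + k = m+1 → pvFilled W m n dp i0 0 →
      pvFilled W m n
        ((List.range' i0 k).foldl
          (fun dp i => (List.range (n+1)).foldl (fun dp j => pvSet2 dp i j (cell dp i j)) dp) dp)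
        (i0+k) 0 := by
    intro k
    induction k with
    | zero => intro i0 dp _ h; simpa using h
    | succ k ih =>
      intro i0 dp hk h
      have hi0 : i0 ≤ m := by omega
      rw [List.range'_succ, List.foldl_cons]
      have hrow := pvFill_inner Hcell hi0 (n+1) 0 dp (by omega) h
      rw [← List.range_eq_range'] at hrow
      have h' : pvFilled W m n
          ((List.range (n+1)).foldl (fun dp j => pvSet2 dp i0 j (cell dp i0 j)) dp) (i0+1) 0 := by
        refine ⟨hrow.1, ?_⟩
        intro i' j' hi' hj' hord
        exact hrow.2 i' j' hi' hj' (by omega)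
      have := ih (i0+1) _ (by omega) h'
      have heq : i0 + 1 + k = i0 + (k+1) := by omega
      rwa [heq] at this
  have hinit : pvFilled W m n (List.replicate (m+1) (List.replicate (n+1) (0:Int))) 0 0 := by
    refine ⟨⟨by simp, ?_⟩, by omega⟩
    intro r hr
    rw [List.eq_of_mem_replicate hr]; simp
  have := outer (m+1) 0 _ (by omega) hinit
  rw [← List.range_eq_range'] at this
  exact this.2 i j hi hj (by omega)

theorem edit_distance_eq_WE (w1 w2 : List Char) :
    edit_distance w1 w2 = WE w1 w2 w1.length w2.length := by
  apply pvFill_spec (W := WE w1 w2) _ le_rfl le_rfl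
  intro dp i j hi hj hf
  match i, j with
  | 0, j => simp [WE]
  | (i+1), 0 => simp [WE]
  | (i+1), (j+1) =>
    have hd := hf.2 i j (by omega) (by omega) (by omega)
    have hu := hf.2 i (j+1) (by omega) (by omega) (by omega)
    have hl := hf.2 (i+1) j (by omega) (by omega) (by omega)
    simp only [Nat.add_sub_cancel, if_neg (Nat.succ_ne_zero i), if_neg (Nat.succ_ne_zero j)]
    rw [hd, hu, hl, WE]

theorem sentence_alignment_cost_eq_WS (L1 L2 : List String) :
    sentence_alignment_cost L1 L2 = WS L1 L2 L1.length L2.length := by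
  apply pvFill_spec (W := WS L1 L2) _ le_rfl le_rfl
  intro dp i j hi hj hf
  match i, j with
  | 0, 0 => simp [WS]
  | 0, (j+1) =>
    have hl := hf.2 0 j (by omega) (by omega) (by omega)
    simp only [Nat.add_sub_cancel]
    rw [if_neg (by simp), if_true, hl, WS]
  | (i+1), 0 =>
    have hu := hf.2 i 0 (by omega) (by omega) (by omega)
    simp only [Nat.add_sub_cancel]
    rw [if_neg (by simp), if_neg (Nat.succ_ne_zero i), if_true, hu, WS]
  | (i+1), (j+1) =>
    have hd := hf.2 i j (by omega) (by omega) (by omega)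
    have hu := hf.2 i (j+1) (by omega) (by omega) (by omega)
    have hl := hf.2 (i+1) j (by omega) (by omega) (by omega)
    simp only [Nat.add_sub_cancel]
    rw [if_neg (by simp), if_neg (Nat.succ_ne_zero i), if_neg (Nat.succ_ne_zero j),
      hd, hu, hl, WS]

-- ---- B side: the memoized recursions compute the same recurrences ----
-- memo invariant: every stored value is the recurrence value of its key
def EdMemoOK (w1 w2 : List Char) (mm : PySem.Dict (Nat × Nat) Int) : Prop :=
  ∀ p v, mm.get? p = some v → v = WE w1 w2 p.1 p.2

theorem edMemoOK_insert {w1 w2 : List Char} {mm : PySem.Dict (Nat × Nat) Int}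
    (h : EdMemoOK w1 w2 mm) {i j : Nat} {v : Int} (hv : v = WE w1 w2 i j) :
    EdMemoOK w1 w2 (mm.insert (i, j) v) := by
  intro p u hu
  rw [PySem.Dict.get?_insert] at hu
  by_cases hp : p = (i, j)
  · rw [if_pos hp] at hu
    cases hu
    rw [hv, hp]
  · rw [if_neg hp] at hu
    exact h _ _ hu

theorem edGoB_spec (w1 w2 : List Char) :
    ∀ (n i j : Nat) (mm : PySem.Dict (Nat × Nat) Int), i + j ≤ n → EdMemoOK w1 w2 mm →
      (edGoB w1 w2 i j mm).1 = WE w1 w2 i j ∧ EdMemoOK w1 w2 (edGoB w1 w2 i j mm).2 := by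
  intro n
  induction n with
  | zero =>
    intro i j mm hn hmm
    have hi : i = 0 := by omega
    subst hi
    rw [edGoB]
    exact ⟨by rw [WE], hmm⟩
  | succ n ih =>
    intro i j mm hn hmm
    match i, j with
    | 0, j => rw [edGoB]; exact ⟨by rw [WE], hmm⟩
    | (i+1), 0 => rw [edGoB]; exact ⟨by rw [WE], hmm⟩
    | (i+1), (j+1) =>
      rw [edGoB]
      cases hg : mm.get? (i+1, j+1) with
      | some v =>
        exact ⟨hmm (i+1, j+1) v hg, hmm⟩
      | none =>
        by_cases hc : w1.getD i default = w2.getD j default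
        · rw [if_pos hc]
          obtain ⟨h1, h2⟩ := ih i j mm (by omega) hmm
          have hv : (edGoB w1 w2 i j mm).1 = WE w1 w2 (i+1) (j+1) := by
            rw [h1, WE, if_pos hc]
          exact ⟨hv, edMemoOK_insert h2 hv⟩
        · rw [if_neg hc]
          obtain ⟨ha1, ha2⟩ := ih i (j+1) mm (by omega) hmm
          obtain ⟨hb1, hb2⟩ := ih (i+1) j _ (by omega) ha2
          obtain ⟨hc1, hc2⟩ := ih i j _ (by omega) hb2
          have hv : 1 + min (edGoB w1 w2 i (j+1) mm).1
              (min (edGoB w1 w2 (i+1) j (edGoB w1 w2 i (j+1) mm).2).1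
                (edGoB w1 w2 i j (edGoB w1 w2 (i+1) j (edGoB w1 w2 i (j+1) mm).2).2).1)
              = WE w1 w2 (i+1) (j+1) := by
            rw [ha1, hb1, hc1, WE, if_neg hc]
          exact ⟨hv, edMemoOK_insert hc2 hv⟩

theorem pyEditDistB_eq (w1 w2 : String) :
    pyEditDistB w1 w2 = edit_distance w1.toList w2.toList := by
  rw [pyEditDistB, edit_distance_eq_WE]
  exact (edGoB_spec w1.toList w2.toList (w1.toList.length + w2.toList.length) _ _ _
    le_rfl (by intro p v hv; simp [pysem] at hv)).1

def SacMemoOK (L1 L2 : List String) (mm : PySem.Dict (Nat × Nat) Int) : Prop :=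
  ∀ p v, mm.get? p = some v → v = WS L1 L2 p.1 p.2

theorem sacMemoOK_insert {L1 L2 : List String} {mm : PySem.Dict (Nat × Nat) Int}
    (h : SacMemoOK L1 L2 mm) {i j : Nat} {v : Int} (hv : v = WS L1 L2 i j) :
    SacMemoOK L1 L2 (mm.insert (i, j) v) := by
  intro p u hu
  rw [PySem.Dict.get?_insert] at hu
  by_cases hp : p = (i, j)
  · rw [if_pos hp] at hu
    cases hu
    rw [hv, hp]
  · rw [if_neg hp] at hu
    exact h _ _ hu

theorem sacGoB_spec (L1 L2 : List String) :
    ∀ (n i j : Nat) (mm : PySem.Dict (Nat × Nat) Int), i + j ≤ n → SacMemoOK L1 L2 mm →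
      (sacGoB L1 L2 i j mm).1 = WS L1 L2 i j ∧ SacMemoOK L1 L2 (sacGoB L1 L2 i j mm).2 := by
  intro n
  induction n with
  | zero =>
    intro i j mm hn hmm
    have hi : i = 0 := by omega
    have hj : j = 0 := by omega
    subst hi; subst hj
    rw [sacGoB]
    exact ⟨by rw [WS], hmm⟩
  | succ n ih =>
    intro i j mm hn hmm
    match i, j with
    | 0, 0 => rw [sacGoB]; exact ⟨by rw [WS], hmm⟩
    | 0, (j+1) =>
      obtain ⟨h1, h2⟩ := ih 0 j mm (by omega) hmm
      rw [sacGoB]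
      exact ⟨by rw [h1, WS], h2⟩
    | (i+1), 0 =>
      obtain ⟨h1, h2⟩ := ih i 0 mm (by omega) hmm
      rw [sacGoB]
      exact ⟨by rw [h1, WS], h2⟩
    | (i+1), (j+1) =>
      rw [sacGoB]
      cases hg : mm.get? (i+1, j+1) with
      | some v =>
        exact ⟨hmm (i+1, j+1) v hg, hmm⟩
      | none =>
        obtain ⟨ha1, ha2⟩ := ih i j mm (by omega) hmm
        obtain ⟨hb1, hb2⟩ := ih i (j+1) _ (by omega) ha2
        obtain ⟨hc1, hc2⟩ := ih (i+1) j _ (by omega) hb2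
        have hv : min ((sacGoB L1 L2 i j mm).1 +
              pyEditDistB (L1.getD i "") (L2.getD j ""))
            (min ((sacGoB L1 L2 i (j+1) (sacGoB L1 L2 i j mm).2).1 + PySem.Str.len (L1.getD i ""))
              ((sacGoB L1 L2 (i+1) j (sacGoB L1 L2 i (j+1) (sacGoB L1 L2 i j mm).2).2).1
                  + PySem.Str.len (L2.getD j "")))
            = WS L1 L2 (i+1) (j+1) := by
          rw [ha1, hb1, hc1, pyEditDistB_eq, WS]
        exact ⟨hv, sacMemoOK_insert hc2 hv⟩

theorem sentence_alignment_cost_alt_eq_WS (L1 L2 : List String) :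
    sentence_alignment_cost_alt L1 L2 = WS L1 L2 L1.length L2.length := by
  rw [sentence_alignment_cost_alt]
  exact (sacGoB_spec L1 L2 (L1.length + L2.length) _ _ _ le_rfl
    (by intro p v hv; simp [pysem] at hv)).1

-- ===== VERDICT (by name: the statement is the Claim_ definition above) =====
theorem sentence_alignment_cost_spec : Claim_equal_sentence_alignment_cost := by
  intro s1 s2 _
  unfold Spec_sentence_alignment_cost
  rw [sentence_alignment_cost_eq_WS, sentence_alignment_cost_alt_eq_WS]
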